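-- pv_equiv track=rewrite | github.com/CyranoB/pedantic-parakeet | tests/test_parakeet.py | _simulate_stuck_prevention
-- ===== SOURCE A (Python) =====
-- def _simulate_stuck_prevention(
--     duration: int, step: int, new_symbols: int, max_symbols: int, iterations: int
-- ) -> tuple[int, int]:
--     """Simulate stuck prevention logic for testing."""
--     for _ in range(iterations):
--         if duration == 0:
--             new_symbols += 1
--             if max_symbols <= new_symbols:
--                 step += 1
--                 new_symbols = 0
--     return step, new_symbols
-- ===== SOURCE B (Python) =====
-- def _simulate_stuck_prevention(
--     duration: int, step: int, new_symbols: int, max_symbols: int, iterations: int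
-- ) -> tuple[int, int]:
--     """Closed-form (O(1)) simulation of the counter wrap."""
--     if duration != 0 or iterations <= 0:
--         return step, new_symbols
--     first_reset = max(max_symbols - new_symbols, 1)  # iterations until the first reset
--     if iterations < first_reset:
--         return step, new_symbols + iterations
--     extra_wraps, final = divmod(iterations - first_reset, max(max_symbols, 1))
--     return step + 1 + extra_wraps, final
-- ===== Notes on version B (the rewrite author's own statement) =====
-- stated objective: faster
-- what changed: Replaced the O(iterations) step-by-step counter simulation with a closed-form computation: iterations to the first reset, then divmod over the wrap period.
import Mathlib
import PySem

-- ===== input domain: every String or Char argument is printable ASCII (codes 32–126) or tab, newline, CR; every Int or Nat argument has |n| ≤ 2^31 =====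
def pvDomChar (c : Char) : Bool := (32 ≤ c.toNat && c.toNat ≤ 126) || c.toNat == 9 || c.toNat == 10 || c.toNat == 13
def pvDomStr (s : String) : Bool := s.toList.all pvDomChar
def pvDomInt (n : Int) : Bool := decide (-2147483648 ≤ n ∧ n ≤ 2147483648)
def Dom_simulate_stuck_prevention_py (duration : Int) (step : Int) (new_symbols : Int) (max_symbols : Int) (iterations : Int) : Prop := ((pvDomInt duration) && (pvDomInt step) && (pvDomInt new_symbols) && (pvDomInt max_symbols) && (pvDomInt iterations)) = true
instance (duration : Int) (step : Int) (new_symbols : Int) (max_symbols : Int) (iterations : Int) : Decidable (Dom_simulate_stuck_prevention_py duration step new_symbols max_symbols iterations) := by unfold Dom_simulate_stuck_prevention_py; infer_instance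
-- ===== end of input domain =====

-- ===== PORT A =====
-- One honest line: B replaces A's per-iteration counter loop by a closed-form divmod computation (asymptotically faster).
def pvLoopA (duration : Int) (max_symbols : Int) : Nat → Int × Int → Int × Int
  | 0, st => st
  | n+1, (step, ns) =>
    if duration = 0 then
      let ns' := ns + 1
      if max_symbols ≤ ns' then pvLoopA duration max_symbols n (step + 1, 0)
      else pvLoopA duration max_symbols n (step, ns')
    else pvLoopA duration max_symbols n (step, ns)

def simulate_stuck_prevention_py (duration : Int) (step : Int) (new_symbols : Int) (max_symbols : Int) (iterations : Int) : Int × Int :=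
  pvLoopA duration max_symbols iterations.toNat (step, new_symbols)

-- ===== PORT B =====
def simulate_stuck_prevention_py_alt (duration : Int) (step : Int) (new_symbols : Int) (max_symbols : Int) (iterations : Int) : Int × Int :=
  if duration ≠ 0 ∨ iterations ≤ 0 then (step, new_symbols)
  else
    let first_reset := max (max_symbols - new_symbols) 1
    if iterations < first_reset then (step, new_symbols + iterations)
    else
      let p := max max_symbols 1
      let extra_wraps := PySem.Int.floordiv (iterations - first_reset) p
      let final := PySem.Int.mod (iterations - first_reset) p
      (step + 1 + extra_wraps, final)

-- ===== PRECONDITION & SPEC =====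
def Spec_simulate_stuck_prevention_py (duration : Int) (step : Int) (new_symbols : Int) (max_symbols : Int) (iterations : Int) (out : Int × Int) : Prop := out = simulate_stuck_prevention_py_alt duration step new_symbols max_symbols iterations
instance (duration : Int) (step : Int) (new_symbols : Int) (max_symbols : Int) (iterations : Int) (out : Int × Int) : Decidable (Spec_simulate_stuck_prevention_py duration step new_symbols max_symbols iterations out) := by unfold Spec_simulate_stuck_prevention_py; infer_instance

-- ===== CLAIM (what is proved, stated in full; the proofs are below) =====
def Claim_equal_simulate_stuck_prevention_py : Prop := ∀ (duration : Int) (step : Int) (new_symbols : Int) (max_symbols : Int) (iterations : Int), Dom_simulate_stuck_prevention_py duration step new_symbols max_symbols iterations → Spec_simulate_stuck_prevention_py duration step new_symbols max_symbols iterations (simulate_stuck_prevention_py duration step new_symbols max_symbols iterations)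

-- ===== LEMMAS AND PROOFS =====

theorem pvLoopA_ne (duration max_symbols : Int) (hd : duration ≠ 0) :
    ∀ (n : Nat) (st : Int × Int), pvLoopA duration max_symbols n st = st := by
  intro n
  induction n with
  | zero => intro st; rfl
  | succ n ih => intro st; obtain ⟨s, ns⟩ := st; simp [pvLoopA, hd, ih]

theorem pvLoopA_closed (m : Int) :
    ∀ (n : Nat) (step ns : Int), pvLoopA 0 m n (step, ns) =
      if (n : Int) < max (m - ns) 1 then (step, ns + n)
      else (step + 1 + ((n : Int) - max (m - ns) 1) / max m 1,
            ((n : Int) - max (m - ns) 1) % max m 1) := by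
  intro n
  induction n with
  | zero =>
    intro step ns
    have : (0 : Int) < max (m - ns) 1 := lt_of_lt_of_le one_pos (le_max_right _ _)
    simp [pvLoopA, this]
  | succ n ih =>
    intro step ns
    have hp : (0 : Int) < max m 1 := lt_of_lt_of_le one_pos (le_max_right _ _)
    by_cases h : m ≤ ns + 1
    · -- the first iteration resets
      have h1 : max (m - ns) 1 = 1 := by omega
      have h0 : max (m - 0) 1 = max m 1 := by omega
      rw [show pvLoopA 0 m (n+1) (step, ns) = pvLoopA 0 m n (step + 1, 0) by
        simp [pvLoopA, h], ih, h0, h1]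
      by_cases hn : (n : Int) < max m 1
      · have hnd : ((n : Int)) / max m 1 = 0 := Int.ediv_eq_zero_of_lt (by omega) (by omega)
        have hnm : ((n : Int)) % max m 1 = (n : Int) := Int.emod_eq_of_lt (by omega) (by omega)
        simp only [hn, if_true]
        push_cast
        rw [show (n : Int) + 1 - 1 = (n : Int) by ring, hnd, hnm]
        simp
      · simp only [hn, if_false]
        have hd : ((n : Int) + 1 - 1) / max m 1 = ((n : Int) - max m 1) / max m 1 + 1 := by
          have := Int.add_mul_ediv_right ((n : Int) - max m 1) 1 (ne_of_gt hp)
          rw [show (n : Int) + 1 - 1 = (n : Int) - max m 1 + 1 * max m 1 by ring, this]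
        have hm : ((n : Int) + 1 - 1) % max m 1 = ((n : Int) - max m 1) % max m 1 := by
          rw [show (n : Int) + 1 - 1 = (n : Int) by ring, ← Int.sub_emod_right (n : Int) (max m 1)]
        push_cast
        rw [hd, hm]
        have h3 : ¬ ((n : Int) + 1 < 1) := by omega
        simp only [h3, if_false]
        rw [show step + 1 + 1 + ((n : Int) - max m 1) / max m 1 = step + 1 + (((n : Int) - max m 1) / max m 1 + 1) by ring]
    · -- no reset yet
      have h2 : max (m - (ns + 1)) 1 = max (m - ns) 1 - 1 := by omega
      rw [show pvLoopA 0 m (n+1) (step, ns) = pvLoopA 0 m n (step, ns + 1) by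
        simp [pvLoopA, h], ih, h2]
      have hiff : ((n : Int) < max (m - ns) 1 - 1) ↔ ((n : Int) + 1 < max (m - ns) 1) := by omega
      push_cast
      by_cases hn : (n : Int) < max (m - ns) 1 - 1
      · simp only [hn, hiff.mp hn, if_true]
        rw [show ns + 1 + (n : Int) = ns + ((n : Int) + 1) by ring]
      · simp only [hn, (not_iff_not.mpr hiff).mp hn, if_false]
        rw [show (n : Int) - (max (m - ns) 1 - 1) = (n : Int) + 1 - max (m - ns) 1 by ring]

-- ===== VERDICT (by name: the statement is the Claim_ definition above) =====
theorem simulate_stuck_prevention_py_spec : Claim_equal_simulate_stuck_prevention_py := by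
  intro duration step new_symbols max_symbols iterations _
  unfold Spec_simulate_stuck_prevention_py simulate_stuck_prevention_py simulate_stuck_prevention_py_alt
  by_cases hd : duration = 0
  · subst hd
    by_cases hi : iterations ≤ 0
    · have : iterations.toNat = 0 := Int.toNat_of_nonpos hi
      simp [this, pvLoopA, hi]
    · have hit : (iterations.toNat : Int) = iterations := Int.toNat_of_nonneg (by omega)
      have hp : (0 : Int) < max max_symbols 1 := lt_of_lt_of_le one_pos (le_max_right _ _)
      rw [pvLoopA_closed, hit]
      simp [hi]
  · rw [pvLoopA_ne _ _ hd]
    simp [hd]
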